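-- pv_equiv track=rewrite | github.com/tacitvenom/genomics_algo | genomics_algo/utilities/seq_read_qualities_processing.py | get_freq_for_qualities
-- ===== SOURCE A (Python) =====
-- from collections import Counter
-- from typing import List, Tuple
--
-- def map_phred33_ascii_to_qualityscore(phred33_char: str) -> float:
--     """Maps a ASCII phred33 quality character to a quality score
--     >>> map_phred33_ascii_to_qualityscore("#")
--     2
--     >>> map_phred33_ascii_to_qualityscore("J")
--     41
--     """
--     return ord(phred33_char) - 33
--
-- def get_freq_for_qualities(qualities: List[str]) -> Tuple[List[str], List[int]]:
--     """Generates a frequency distribution from a list of quality strings"""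
--     concatenated_qualities = "".join(qualities)
--     quality_scores = [
--         map_phred33_ascii_to_qualityscore(char) for char in concatenated_qualities
--     ]
--     freq = Counter(quality_scores)
--     sorted_freq = sorted(dict(freq).items())
--     values = [pair[0] for pair in sorted_freq]
--     frequencies = [pair[1] for pair in sorted_freq]
--     return values, frequencies
-- ===== SOURCE B (Python) =====
-- from itertools import groupby
-- from typing import List, Tuple
--
--
-- def get_freq_for_qualities(qualities: List[str]) -> Tuple[List[str], List[int]]:
--     """Generates a frequency distribution from a list of quality strings.
--
--     Sort-then-group: flatten the strings into phred33 scores, sort them once,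
--     and collect each run of equal scores with itertools.groupby."""
--     scores = sorted(ord(char) - 33 for quality in qualities for char in quality)
--     values, frequencies = [], []
--     for key, group in groupby(scores):
--         values.append(key)
--         frequencies.append(sum(1 for _ in group))
--     return values, frequencies
-- ===== Notes on version B (the rewrite author's own statement) =====
-- stated objective: alternative
-- what changed: Replaced the Counter-then-sort-the-distinct-items strategy with sort-all-scores-then-group-consecutive-runs (itertools.groupby), a genuinely different traversal of the data.
import Mathlib
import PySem

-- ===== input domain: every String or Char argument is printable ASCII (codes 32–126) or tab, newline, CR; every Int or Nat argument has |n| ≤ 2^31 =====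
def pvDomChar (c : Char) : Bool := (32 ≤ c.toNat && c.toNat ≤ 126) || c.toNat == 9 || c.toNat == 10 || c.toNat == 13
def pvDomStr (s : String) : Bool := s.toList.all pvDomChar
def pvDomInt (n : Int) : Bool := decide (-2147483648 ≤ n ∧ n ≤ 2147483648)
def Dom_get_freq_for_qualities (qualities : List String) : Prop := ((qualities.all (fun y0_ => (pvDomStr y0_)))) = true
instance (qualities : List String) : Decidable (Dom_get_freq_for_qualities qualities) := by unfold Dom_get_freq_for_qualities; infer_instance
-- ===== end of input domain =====

-- B replaces A's Counter-then-sort-distinct-items strategy with sort-all-scores-then-group-consecutive-runs (itertools.groupby); alternative decomposition, same cost class.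

-- ===== PORT A =====
-- Python's helper receives the 1-character strings obtained by iterating a string;
-- it is ported on Char, where Python's ord is Char.toNat.
def map_phred33_ascii_to_qualityscore (phred33_char : Char) : Int :=
  (phred33_char.toNat : Int) - 33

def get_freq_for_qualities (qualities : List String) : List Int × List Int :=
  let concatenated_qualities := PySem.Str.join "" qualities
  let quality_scores := concatenated_qualities.toList.map
    (fun char => map_phred33_ascii_to_qualityscore char)
  let freq := PySem.Dict.counter quality_scores
  let sorted_freq := PySem.List.sorted2 freq.items (fun p => p.1) (fun p => p.2)
  (sorted_freq.map (fun p => p.1), sorted_freq.map (fun p => p.2))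

-- ===== PORT B =====
-- the groupby loop of Source B: current run key and its length so far are the loop state
def pvGroupLoop (key : Int) (cnt : Int) : List Int → List Int × List Int
  | [] => ([key], [cnt])
  | y :: ys =>
    if y == key then pvGroupLoop key (cnt + 1) ys
    else
      let p := pvGroupLoop y 1 ys
      (key :: p.1, cnt :: p.2)

def pvGroupRuns : List Int → List Int × List Int
  | [] => ([], [])
  | x :: xs => pvGroupLoop x 1 xs

def get_freq_for_qualities_alt (qualities : List String) : List Int × List Int :=
  let scores := PySem.List.sorted
    ((qualities.flatMap (fun q => q.toList)).map (fun char => (char.toNat : Int) - 33))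
    (fun x => x)
  pvGroupRuns scores

-- ===== PRECONDITION & SPEC =====
def Spec_get_freq_for_qualities (qualities : List String) (out : List Int × List Int) : Prop := out = get_freq_for_qualities_alt qualities
instance (qualities : List String) (out : List Int × List Int) : Decidable (Spec_get_freq_for_qualities qualities out) := by unfold Spec_get_freq_for_qualities; infer_instance

-- ===== CLAIM (what is proved, stated in full; the proofs are below) =====
def Claim_equal_get_freq_for_qualities : Prop := ∀ (qualities : List String), Dom_get_freq_for_qualities qualities → Spec_get_freq_for_qualities qualities (get_freq_for_qualities qualities)

-- ===== LEMMAS AND PROOFS =====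

theorem pvGroupLoop_spec (l : List Int) (key cnt : Int)
    (hs : l.Pairwise (· ≤ ·)) (hk : ∀ y ∈ l, key ≤ y) :
    ∃ V : List Int,
      pvGroupLoop key cnt l =
        (key :: V, (cnt + l.count key) :: V.map (fun k => (l.count k : Int))) ∧
      (key :: V).Pairwise (· < ·) ∧
      (∀ k, k ∈ V ↔ k ∈ l ∧ key < k) := by
  induction l generalizing key cnt with
  | nil => exact ⟨[], by simp [pvGroupLoop], by simp, by simp⟩
  | cons y ys ih =>
    rcases List.pairwise_cons.mp hs with ⟨hy, hys⟩
    by_cases hyk : y = key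
    · subst hyk
      obtain ⟨V, h1, h2, h3⟩ := ih (key := y) (cnt := cnt + 1) hys hy
      refine ⟨V, ?_, h2, ?_⟩
      · have hcnt : ∀ k ∈ V, (ys.count k : Int) = ((y :: ys).count k : Int) := by
          intro k hkV
          have : y < k := ((h3 k).mp hkV).2
          rw [List.count_cons_of_ne (by omega)]
        simp only [pvGroupLoop, beq_self_eq_true, if_true, h1, List.count_cons_self,
          Prod.mk.injEq, List.cons.injEq]
        exact ⟨trivial, by push_cast; ring, List.map_congr_left hcnt⟩
      · intro k
        rw [h3]
        constructor
        · rintro ⟨hm, hlt⟩; exact ⟨List.mem_cons_of_mem _ hm, hlt⟩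
        · rintro ⟨hm, hlt⟩
          rcases List.mem_cons.mp hm with rfl | hm
          · omega
          · exact ⟨hm, hlt⟩
    · have hky : key < y := lt_of_le_of_ne (hk y (List.mem_cons_self)) (Ne.symm hyk)
      obtain ⟨V, h1, h2, h3⟩ := ih (key := y) (cnt := 1) hys hy
      have hknot : key ∉ y :: ys := by
        intro hmem
        rcases List.mem_cons.mp hmem with rfl | hm
        · omega
        · exact absurd (hy key hm) (by omega)
      refine ⟨y :: V, ?_, ?_, ?_⟩
      · simp only [pvGroupLoop, beq_iff_eq, hyk, if_false, h1, Prod.mk.injEq, List.cons.injEq]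
        refine ⟨trivial, by rw [List.count_eq_zero_of_not_mem hknot]; push_cast; ring, ?_⟩
        rw [List.map_cons, List.count_cons_self]
        refine congrArg₂ _ (by push_cast; ring) (List.map_congr_left ?_)
        intro k hkV
        have : y < k := ((h3 k).mp hkV).2
        rw [List.count_cons_of_ne (by omega)]
      · refine List.pairwise_cons.mpr ⟨?_, h2⟩
        intro k hm
        rcases List.mem_cons.mp hm with rfl | hm
        · exact hky
        · exact lt_trans hky ((h3 k).mp hm).2
      · intro k
        constructor
        · intro hm
          rcases List.mem_cons.mp hm with rfl | hm
          · exact ⟨List.mem_cons_self, hky⟩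
          · exact ⟨List.mem_cons_of_mem _ ((h3 k).mp hm).1, lt_trans hky ((h3 k).mp hm).2⟩
        · rintro ⟨hm, hlt⟩
          rcases List.mem_cons.mp hm with rfl | hm
          · exact List.mem_cons_self
          · rcases eq_or_lt_of_le (hy k hm) with rfl | hlt2
            · exact List.mem_cons_self
            · exact List.mem_cons_of_mem _ ((h3 k).mpr ⟨hm, hlt2⟩)

theorem pvInsertBy_congr {α : Type} (b1 b2 : α → α → Bool) (x : α) (ys : List α)
    (h : ∀ y ∈ ys, b1 x y = b2 x y) :
    PySem.List.insertBy b1 x ys = PySem.List.insertBy b2 x ys := by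
  induction ys with
  | nil => rfl
  | cons y ys ih =>
    simp only [PySem.List.insertBy, h y List.mem_cons_self]
    split
    · rfl
    · exact congrArg _ (ih fun z hz => h z (List.mem_cons_of_mem _ hz))

theorem pvFoldlInsertBy_congr {α : Type} (b1 b2 : α → α → Bool) (S : List α)
    (h : ∀ a ∈ S, ∀ b ∈ S, b1 a b = b2 a b) :
    ∀ (xs acc : List α), (∀ a ∈ xs, a ∈ S) → (∀ a ∈ acc, a ∈ S) →
      xs.foldl (fun acc x => PySem.List.insertBy b1 x acc) acc =
      xs.foldl (fun acc x => PySem.List.insertBy b2 x acc) acc := by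
  intro xs
  induction xs with
  | nil => intro acc _ _; rfl
  | cons x xs ih =>
    intro acc hxs hacc
    simp only [List.foldl_cons]
    rw [pvInsertBy_congr b1 b2 x acc (fun y hy => h x (hxs x List.mem_cons_self) y (hacc y hy))]
    exact ih _ (fun a ha => hxs a (List.mem_cons_of_mem _ ha))
      (fun a ha => by
        rcases (PySem.List.mem_insertBy b2 x a acc).mp ha with rfl | ha
        · exact hxs a List.mem_cons_self
        · exact hacc a ha)

-- sorted2 over a list of pairs with "equal firsts → equal" collapses to sorted by fst

theorem pvSorted2_eq_sorted_fst (items : List (Int × Int))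
    (h : ∀ a ∈ items, ∀ b ∈ items, a.1 = b.1 → a = b) :
    PySem.List.sorted2 items (fun p => p.1) (fun p => p.2) =
      PySem.List.sorted items (fun p => p.1) := by
  rw [PySem.List.sorted_eq_foldl_insertBy]
  show List.foldl _ [] items = _
  refine pvFoldlInsertBy_congr _ _ items ?_ items [] (fun a ha => ha) (by simp)
  intro a ha b hb
  rcases lt_trichotomy a.1 b.1 with hlt | heq | hgt
  · simp [hlt, not_lt_of_gt hlt]
  · have : a = b := h a ha b hb heq
    subst this
    simp
  · simp [hgt, not_lt_of_gt hgt]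

theorem pvAgree (qualities : List String) :
    get_freq_for_qualities qualities = get_freq_for_qualities_alt qualities := by
  have hjoin : (PySem.Str.join "" qualities).toList = qualities.flatMap (fun q => q.toList) := by
    rw [PySem.Str.toList_join]
    show PySem.Chars.join [] (qualities.map String.toList) = _
    induction qualities with
    | nil => rfl
    | cons q qs ih => cases qs <;> simp_all [PySem.Chars.join, List.intercalate]
  set raw : List Int :=
    (qualities.flatMap (fun q => q.toList)).map (fun char => (char.toNat : Int) - 33) with hraw
  have hscores : (PySem.Str.join "" qualities).toList.map
      (fun char => map_phred33_ascii_to_qualityscore char) = raw := by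
    rw [hjoin]; rfl
  have hitems : (PySem.Dict.counter raw).items =
      (PySem.Set.ofList raw).map (fun k => (k, (List.count k raw : Int))) :=
    PySem.Dict.items_counter raw
  set s := PySem.List.sorted raw (fun x => x) with hsdef
  have hperm : s.Perm raw := PySem.List.sorted_perm raw (fun x => x) false
  have hpw : s.Pairwise (· ≤ ·) := PySem.List.sorted_pairwise raw (fun x => x)
  show get_freq_for_qualities qualities = get_freq_for_qualities_alt qualities
  simp only [get_freq_for_qualities, get_freq_for_qualities_alt]
  rw [hscores, ← hraw, ← hsdef]
  match hseq : s with
  | [] =>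
    have hraweq : raw = [] := (PySem.List.sorted_eq_nil_iff raw (fun x => x) false).mp hseq
    rw [hraweq]
    simp [pvGroupRuns, PySem.Dict.counter, PySem.Dict.empty, PySem.List.sorted2]
  | x :: xs =>
    rcases List.pairwise_cons.mp hpw with ⟨hx, hxs⟩
    obtain ⟨V, h1, h2, h3⟩ := pvGroupLoop_spec xs x 1 hxs hx
    have hmemV : ∀ k, k ∈ x :: V ↔ k ∈ raw := by
      intro k
      rw [← hperm.mem_iff]
      constructor
      · intro hm
        rcases List.mem_cons.mp hm with rfl | hm
        · exact List.mem_cons_self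
        · exact List.mem_cons_of_mem _ ((h3 k).mp hm).1
      · intro hm
        rcases List.mem_cons.mp hm with rfl | hm
        · exact List.mem_cons_self
        · rcases eq_or_lt_of_le (hx k hm) with rfl | hlt
          · exact List.mem_cons_self
          · exact List.mem_cons_of_mem _ ((h3 k).mpr ⟨hm, hlt⟩)
    have hnodupV : (x :: V).Nodup := List.Pairwise.imp (fun h => ne_of_lt h) h2
    have hpermV : (x :: V).Perm (PySem.Set.ofList raw) := by
      rw [List.perm_ext_iff_of_nodup hnodupV (PySem.Set.nodup_ofList raw)]
      intro k
      rw [hmemV, PySem.Set.mem_ofList]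
    have hcount : ∀ k, List.count k raw = List.count k (x :: xs) := by
      intro k
      exact (hperm.count_eq k).symm
    have hsorted : PySem.List.sorted ((PySem.Dict.counter raw).items) (fun p => p.1) =
        (x :: V).map (fun k => (k, (List.count k raw : Int))) := by
      apply PySem.List.sorted_eq_of_perm_of_pairwise_lt
      · rw [hitems]; exact hpermV.map _
      · exact List.pairwise_map.mpr (h2.imp (fun h => h))
    have hsorted2 : PySem.List.sorted2 ((PySem.Dict.counter raw).items)
        (fun p => p.1) (fun p => p.2) =
        (x :: V).map (fun k => (k, (List.count k raw : Int))) := by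
      rw [← hsorted]
      apply pvSorted2_eq_sorted_fst
      rw [hitems]
      rintro a ha b hb hab
      rcases List.mem_map.mp ha with ⟨ka, _, rfl⟩
      rcases List.mem_map.mp hb with ⟨kb, _, rfl⟩
      simp only at hab
      subst hab
      rfl
    show (_, _) = pvGroupRuns (x :: xs)
    rw [hsorted2]
    simp only [pvGroupRuns, h1, List.map_map]
    refine congrArg₂ Prod.mk ?_ ?_
    · simp [Function.comp_def]
    · simp only [Function.comp_def, List.map_cons]
      refine congrArg₂ List.cons ?_ (List.map_congr_left ?_)
      · rw [hcount x, List.count_cons_self]; push_cast; ring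
      · intro k hkV
        have hx2 : x < k := ((h3 k).mp hkV).2
        rw [hcount k, List.count_cons_of_ne (by omega)]

-- ===== VERDICT (by name: the statement is the Claim_ definition above) =====
theorem get_freq_for_qualities_spec : Claim_equal_get_freq_for_qualities := by
  intro qualities _
  unfold Spec_get_freq_for_qualities
  exact pvAgree qualities
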